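-- pv_equiv track=rewrite | github.com/Vineyardcode/voynich_slop | scripts/phase86_chunk_equivalence.py | slot_pattern
-- ===== SOURCE A (Python) =====
-- SLOT1 = {'ch', 'sh', 'y'}
--
-- SLOT2_RUNS = {'e'}
--
-- SLOT2_SINGLE = {'q', 'a'}
--
-- SLOT3 = {'o'}
--
-- SLOT4_RUNS = {'i'}
--
-- SLOT4_SINGLE = {'d'}
--
-- SLOT5 = {'y', 'p', 'f', 'k', 'l', 'r', 's', 't',
--          'cth', 'ckh', 'cph', 'cfh', 'n', 'm'}
--
-- def slot_pattern(chunk_glyphs):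
--     """Return binary tuple: (s1,s2,s3,s4,s5) for which slots are filled."""
--     slots = [0, 0, 0, 0, 0]
--     pos = 0
--     gs = list(chunk_glyphs)
--     if pos < len(gs) and gs[pos] in SLOT1:
--         slots[0] = 1; pos += 1
--     if pos < len(gs):
--         if gs[pos] in SLOT2_RUNS:
--             slots[1] = 1
--             while pos < len(gs) and gs[pos] in SLOT2_RUNS: pos += 1
--         elif gs[pos] in SLOT2_SINGLE:
--             slots[1] = 1; pos += 1
--     if pos < len(gs) and gs[pos] in SLOT3:
--         slots[2] = 1; pos += 1
--     if pos < len(gs):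
--         if gs[pos] in SLOT4_RUNS:
--             slots[3] = 1
--             while pos < len(gs) and gs[pos] in SLOT4_RUNS: pos += 1
--         elif gs[pos] in SLOT4_SINGLE:
--             slots[3] = 1; pos += 1
--     if pos < len(gs) and gs[pos] in SLOT5:
--         slots[4] = 1; pos += 1
--     return tuple(slots)
-- ===== SOURCE B (Python) =====
-- # glyph -> ordered list of slots it can occupy (run glyphs 'e',''i' handled by collapsing)
-- SLOT_OF = {'ch': [1], 'sh': [1], 'y': [1, 5],
--            'e': [2], 'q': [2], 'a': [2],
--            'o': [3],
--            'i': [4], 'd': [4],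
--            'p': [5], 'f': [5], 'k': [5], 'l': [5], 'r': [5], 's': [5], 't': [5],
--            'cth': [5], 'ckh': [5], 'cph': [5], 'cfh': [5], 'n': [5], 'm': [5]}
--
--
-- def slot_pattern(chunk_glyphs):
--     """Return binary tuple: (s1,s2,s3,s4,s5) for which slots are filled."""
--     # stage 1: collapse adjacent runs of the run glyphs 'e' and 'i' to one token
--     collapsed = []
--     for g in chunk_glyphs:
--         if not (g in ('e', 'i') and collapsed and collapsed[-1] == g):
--             collapsed.append(g)
--     # stage 2: glyph-major greedy assignment — each token fills the smallest
--     # still-available slot it belongs to; first unplaceable token ends the word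
--     slots = [0, 0, 0, 0, 0]
--     nxt = 1
--     for g in collapsed:
--         cands = [s for s in SLOT_OF.get(g, ()) if s >= nxt]
--         if not cands:
--             break
--         slots[cands[0] - 1] = 1
--         nxt = cands[0] + 1
--     return tuple(slots)
-- ===== Notes on version B (the rewrite author's own statement) =====
-- stated objective: alternative
-- what changed: Instead of A's slot-major cursor walk through five unrolled blocks, B first collapses adjacent runs of the run glyphs 'e'/'i', then does a glyph-major greedy pass over the tokens, giving each token the smallest still-available slot from a glyph-to-slots map and stopping at the first unplaceable token.
import Mathlib
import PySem

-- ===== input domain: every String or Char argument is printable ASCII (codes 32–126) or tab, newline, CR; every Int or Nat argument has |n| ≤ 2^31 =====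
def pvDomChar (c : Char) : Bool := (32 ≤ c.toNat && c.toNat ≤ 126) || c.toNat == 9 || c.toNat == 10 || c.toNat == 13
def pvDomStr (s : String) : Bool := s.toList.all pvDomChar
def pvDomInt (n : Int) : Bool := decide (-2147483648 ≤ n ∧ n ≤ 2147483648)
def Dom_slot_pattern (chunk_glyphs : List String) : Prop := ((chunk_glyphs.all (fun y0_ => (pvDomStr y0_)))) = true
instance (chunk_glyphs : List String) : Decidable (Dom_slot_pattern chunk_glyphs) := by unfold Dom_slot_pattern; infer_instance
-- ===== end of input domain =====

-- B replaces A's slot-major cursor walk by a different algorithm: collapse adjacent 'e'/'i' runs, then a glyph-major greedy pass assigning each token the smallest available slot from a glyph→slots map; objective: alternative.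


-- ===== PORT A =====
-- the module-level glyph sets (Python sets of string literals)
def pvSLOT1 : List String := ["ch", "sh", "y"]
def pvSLOT2_RUNS : List String := ["e"]
def pvSLOT2_SINGLE : List String := ["q", "a"]
def pvSLOT3 : List String := ["o"]
def pvSLOT4_RUNS : List String := ["i"]
def pvSLOT4_SINGLE : List String := ["d"]
def pvSLOT5 : List String := ["y", "p", "f", "k", "l", "r", "s", "t",
  "cth", "ckh", "cph", "cfh", "n", "m"]

-- `while pos < len(gs) and gs[pos] in runs: pos += 1` (A's run-consuming while loop)
def pvSkipRun (runs : List String) (gs : List String) (pos : Nat) : Nat :=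
  if pos < gs.length ∧ runs.contains (gs.getD pos "") then pvSkipRun runs gs (pos + 1) else pos
termination_by gs.length - pos
decreasing_by omega

-- A: five hand-unrolled blocks, each setting slots[i] and advancing pos
def slot_pattern (chunk_glyphs : List String) : List Int :=
  let (s1, pos1) :=
    if 0 < chunk_glyphs.length ∧ pvSLOT1.contains (chunk_glyphs.getD 0 "") then
      ((1 : Int), 0 + 1)
    else (0, 0)
  let (s2, pos2) :=
    if pos1 < chunk_glyphs.length then
      if pvSLOT2_RUNS.contains (chunk_glyphs.getD pos1 "") then
        ((1 : Int), pvSkipRun pvSLOT2_RUNS chunk_glyphs pos1)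
      else if pvSLOT2_SINGLE.contains (chunk_glyphs.getD pos1 "") then (1, pos1 + 1)
      else (0, pos1)
    else (0, pos1)
  let (s3, pos3) :=
    if pos2 < chunk_glyphs.length ∧ pvSLOT3.contains (chunk_glyphs.getD pos2 "") then
      ((1 : Int), pos2 + 1)
    else (0, pos2)
  let (s4, pos4) :=
    if pos3 < chunk_glyphs.length then
      if pvSLOT4_RUNS.contains (chunk_glyphs.getD pos3 "") then
        ((1 : Int), pvSkipRun pvSLOT4_RUNS chunk_glyphs pos3)
      else if pvSLOT4_SINGLE.contains (chunk_glyphs.getD pos3 "") then (1, pos3 + 1)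
      else (0, pos3)
    else (0, pos3)
  let s5 :=
    if pos4 < chunk_glyphs.length ∧ pvSLOT5.contains (chunk_glyphs.getD pos4 "") then (1 : Int)
    else 0
  [s1, s2, s3, s4, s5]

-- ===== PORT B =====
-- the dict SLOT_OF: glyph -> ordered list of slots that glyph can occupy
def pvSLOT_OF : PySem.Dict String (List Int) := PySem.Dict.mk
  [("ch", [1]), ("sh", [1]), ("y", [1, 5]),
   ("e", [2]), ("q", [2]), ("a", [2]),
   ("o", [3]),
   ("i", [4]), ("d", [4]),
   ("p", [5]), ("f", [5]), ("k", [5]), ("l", [5]), ("r", [5]), ("s", [5]), ("t", [5]),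
   ("cth", [5]), ("ckh", [5]), ("cph", [5]), ("cfh", [5]), ("n", [5]), ("m", [5])]

-- stage 1: `for g in chunk_glyphs: if not (g in ('e','i') and collapsed and collapsed[-1]==g): collapsed.append(g)`
def pvCollapse (chunk_glyphs : List String) : List String :=
  chunk_glyphs.foldl
    (fun collapsed g =>
      if ¬((g = "e" ∨ g = "i") ∧ collapsed ≠ [] ∧ collapsed.getLast? = some g)
      then collapsed ++ [g] else collapsed) []

-- stage 2: the `for g in collapsed: … break` loop (the break becomes the [] match arm);
-- `cands[0] - 1` is 0-based: every slot number in pvSLOT_OF is ≥ 1, so .toNat is exact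
def pvAssign (gs : List String) (nxt : Int) (slots : List Int) : List Int :=
  match gs with
  | [] => slots
  | g :: rest =>
    match (pvSLOT_OF.getD g []).filter (fun s => decide (nxt ≤ s)) with
    | [] => slots
    | c :: _ => pvAssign rest (c + 1) (slots.set (c - 1).toNat 1)

def slot_pattern_alt (chunk_glyphs : List String) : List Int :=
  pvAssign (pvCollapse chunk_glyphs) 1 [0, 0, 0, 0, 0]

-- ===== PRECONDITION & SPEC =====
def Spec_slot_pattern (chunk_glyphs : List String) (out : List Int) : Prop := out = slot_pattern_alt chunk_glyphs
instance (chunk_glyphs : List String) (out : List Int) : Decidable (Spec_slot_pattern chunk_glyphs out) := by unfold Spec_slot_pattern; infer_instance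

-- ===== CLAIM (what is proved, stated in full; the proofs are below) =====
def Claim_equal_slot_pattern : Prop := ∀ (chunk_glyphs : List String), Dom_slot_pattern chunk_glyphs → Spec_slot_pattern chunk_glyphs (slot_pattern chunk_glyphs)

-- ===== LEMMAS AND PROOFS =====

-- the common reference recursion both sides are reduced to: glyph-major greedy
-- assignment directly on the RAW glyph list, consuming a whole run after a run glyph
def pvRun (gs : List String) (nxt : Int) (slots : List Int) : List Int :=
  match gs with
  | [] => slots
  | g :: rest =>
    match (pvSLOT_OF.getD g []).filter (fun s => decide (nxt ≤ s)) with
    | [] => slots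
    | c :: _ =>
      pvRun (if g = "e" ∨ g = "i" then rest.dropWhile (fun x => decide (x = g)) else rest)
        (c + 1) (slots.set (c - 1).toNat 1)
termination_by gs.length
decreasing_by
  split
  · have := List.length_dropWhile_le (fun x => decide (x = g)) rest
    simp
    omega
  · simp

-- full case analysis of a glyph: either a known glyph (22 literals) or an
-- unknown one, on which every set test and the dict lookup come out empty
set_option maxHeartbeats 1000000 in
lemma pv_g_cases (g : String) :
    g = "ch" ∨ g = "sh" ∨ g = "y" ∨ g = "e" ∨ g = "q" ∨ g = "a" ∨ g = "o" ∨ g = "i" ∨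
    g = "d" ∨ g = "p" ∨ g = "f" ∨ g = "k" ∨ g = "l" ∨ g = "r" ∨ g = "s" ∨ g = "t" ∨
    g = "cth" ∨ g = "ckh" ∨ g = "cph" ∨ g = "cfh" ∨ g = "n" ∨ g = "m" ∨
    (pvSLOT_OF.getD g [] = [] ∧ pvSLOT1.contains g = false ∧
      pvSLOT2_RUNS.contains g = false ∧ pvSLOT2_SINGLE.contains g = false ∧
      pvSLOT3.contains g = false ∧ pvSLOT4_RUNS.contains g = false ∧
      pvSLOT4_SINGLE.contains g = false ∧ pvSLOT5.contains g = false) := by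
  by_cases h1 : g = "ch"; · exact Or.inl h1
  by_cases h2 : g = "sh"; · exact Or.inr (Or.inl h2)
  by_cases h3 : g = "y"; · exact Or.inr (Or.inr (Or.inl h3))
  by_cases h4 : g = "e"; · exact Or.inr (Or.inr (Or.inr (Or.inl h4)))
  by_cases h5 : g = "q"; · exact Or.inr (Or.inr (Or.inr (Or.inr (Or.inl h5))))
  by_cases h6 : g = "a"; · exact Or.inr (Or.inr (Or.inr (Or.inr (Or.inr (Or.inl h6)))))
  by_cases h7 : g = "o"; · exact Or.inr (Or.inr (Or.inr (Or.inr (Or.inr (Or.inr (Or.inl h7))))))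
  by_cases h8 : g = "i"; · exact Or.inr (Or.inr (Or.inr (Or.inr (Or.inr (Or.inr (Or.inr (Or.inl h8)))))))
  by_cases h9 : g = "d"; · exact Or.inr (Or.inr (Or.inr (Or.inr (Or.inr (Or.inr (Or.inr (Or.inr (Or.inl h9))))))))
  by_cases h10 : g = "p"; · exact Or.inr (Or.inr (Or.inr (Or.inr (Or.inr (Or.inr (Or.inr (Or.inr (Or.inr (Or.inl h10)))))))))
  by_cases h11 : g = "f"; · exact Or.inr (Or.inr (Or.inr (Or.inr (Or.inr (Or.inr (Or.inr (Or.inr (Or.inr (Or.inr (Or.inl h11))))))))))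
  by_cases h12 : g = "k"; · exact Or.inr (Or.inr (Or.inr (Or.inr (Or.inr (Or.inr (Or.inr (Or.inr (Or.inr (Or.inr (Or.inr (Or.inl h12)))))))))))
  by_cases h13 : g = "l"; · exact Or.inr (Or.inr (Or.inr (Or.inr (Or.inr (Or.inr (Or.inr (Or.inr (Or.inr (Or.inr (Or.inr (Or.inr (Or.inl h13))))))))))))
  by_cases h14 : g = "r"; · exact Or.inr (Or.inr (Or.inr (Or.inr (Or.inr (Or.inr (Or.inr (Or.inr (Or.inr (Or.inr (Or.inr (Or.inr (Or.inr (Or.inl h14)))))))))))))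
  by_cases h15 : g = "s"; · exact Or.inr (Or.inr (Or.inr (Or.inr (Or.inr (Or.inr (Or.inr (Or.inr (Or.inr (Or.inr (Or.inr (Or.inr (Or.inr (Or.inr (Or.inl h15))))))))))))))
  by_cases h16 : g = "t"; · exact Or.inr (Or.inr (Or.inr (Or.inr (Or.inr (Or.inr (Or.inr (Or.inr (Or.inr (Or.inr (Or.inr (Or.inr (Or.inr (Or.inr (Or.inr (Or.inl h16)))))))))))))))
  by_cases h17 : g = "cth"; · exact Or.inr (Or.inr (Or.inr (Or.inr (Or.inr (Or.inr (Or.inr (Or.inr (Or.inr (Or.inr (Or.inr (Or.inr (Or.inr (Or.inr (Or.inr (Or.inr (Or.inl h17))))))))))))))))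
  by_cases h18 : g = "ckh"; · exact Or.inr (Or.inr (Or.inr (Or.inr (Or.inr (Or.inr (Or.inr (Or.inr (Or.inr (Or.inr (Or.inr (Or.inr (Or.inr (Or.inr (Or.inr (Or.inr (Or.inr (Or.inl h18)))))))))))))))))
  by_cases h19 : g = "cph"; · exact Or.inr (Or.inr (Or.inr (Or.inr (Or.inr (Or.inr (Or.inr (Or.inr (Or.inr (Or.inr (Or.inr (Or.inr (Or.inr (Or.inr (Or.inr (Or.inr (Or.inr (Or.inr (Or.inl h19))))))))))))))))))
  by_cases h20 : g = "cfh"; · exact Or.inr (Or.inr (Or.inr (Or.inr (Or.inr (Or.inr (Or.inr (Or.inr (Or.inr (Or.inr (Or.inr (Or.inr (Or.inr (Or.inr (Or.inr (Or.inr (Or.inr (Or.inr (Or.inr (Or.inl h20)))))))))))))))))))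
  by_cases h21 : g = "n"; · exact Or.inr (Or.inr (Or.inr (Or.inr (Or.inr (Or.inr (Or.inr (Or.inr (Or.inr (Or.inr (Or.inr (Or.inr (Or.inr (Or.inr (Or.inr (Or.inr (Or.inr (Or.inr (Or.inr (Or.inr (Or.inl h21))))))))))))))))))))
  by_cases h22 : g = "m"; · exact Or.inr (Or.inr (Or.inr (Or.inr (Or.inr (Or.inr (Or.inr (Or.inr (Or.inr (Or.inr (Or.inr (Or.inr (Or.inr (Or.inr (Or.inr (Or.inr (Or.inr (Or.inr (Or.inr (Or.inr (Or.inr (Or.inl h22)))))))))))))))))))))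
  refine Or.inr (Or.inr (Or.inr (Or.inr (Or.inr (Or.inr (Or.inr (Or.inr (Or.inr (Or.inr (Or.inr (Or.inr (Or.inr (Or.inr (Or.inr (Or.inr (Or.inr (Or.inr (Or.inr (Or.inr (Or.inr (Or.inr (⟨?_, ?_, ?_, ?_, ?_, ?_, ?_, ?_⟩))))))))))))))))))))))
  · simp [pvSLOT_OF, PySem.Dict.getD_eq_get?_getD, PySem.Dict.get?, eq_comm (b := g),
      h1, h2, h3, h4, h5, h6, h7, h8, h9, h10, h11, h12, h13, h14, h15, h16, h17, h18,
      h19, h20, h21, h22]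
  · simp [pvSLOT1, List.contains_eq_mem, h1, h2, h3]
  · simp [pvSLOT2_RUNS, List.contains_eq_mem, h4]
  · simp [pvSLOT2_SINGLE, List.contains_eq_mem, h5, h6]
  · simp [pvSLOT3, List.contains_eq_mem, h7]
  · simp [pvSLOT4_RUNS, List.contains_eq_mem, h8]
  · simp [pvSLOT4_SINGLE, List.contains_eq_mem, h9]
  · simp [pvSLOT5, List.contains_eq_mem, h3, h10, h11, h12, h13, h14, h15, h16, h17,
      h18, h19, h20, h21, h22]

-- the filtered candidate lists at each cursor value, phrased with A's set tests
lemma pv_cands5 (g : String) :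
    (pvSLOT_OF.getD g []).filter (fun s => decide ((5 : Int) ≤ s)) =
      if pvSLOT5.contains g then [5] else [] := by
  rcases pv_g_cases g with h|h|h|h|h|h|h|h|h|h|h|h|h|h|h|h|h|h|h|h|h|h|hrest
  all_goals first | (subst h; decide) | simp_all

lemma pv_cands4 (g : String) :
    (pvSLOT_OF.getD g []).filter (fun s => decide ((4 : Int) ≤ s)) =
      if pvSLOT4_RUNS.contains g ∨ pvSLOT4_SINGLE.contains g then [4]
      else if pvSLOT5.contains g then [5] else [] := by
  rcases pv_g_cases g with h|h|h|h|h|h|h|h|h|h|h|h|h|h|h|h|h|h|h|h|h|h|hrest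
  all_goals first | (subst h; decide) | simp_all

lemma pv_cands3_of_not (g : String) (hm : pvSLOT3.contains g = false) :
    (pvSLOT_OF.getD g []).filter (fun s => decide ((3 : Int) ≤ s)) =
      (pvSLOT_OF.getD g []).filter (fun s => decide ((4 : Int) ≤ s)) := by
  rcases pv_g_cases g with h|h|h|h|h|h|h|h|h|h|h|h|h|h|h|h|h|h|h|h|h|h|hrest
  all_goals first | (subst h; revert hm; decide) | simp_all

lemma pv_cands3_of (g : String) (hm : pvSLOT3.contains g = true) :
    (pvSLOT_OF.getD g []).filter (fun s => decide ((3 : Int) ≤ s)) = [3] := by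
  rcases pv_g_cases g with h|h|h|h|h|h|h|h|h|h|h|h|h|h|h|h|h|h|h|h|h|h|hrest
  all_goals first | (subst h; revert hm; decide) | simp_all

lemma pv_cands2_of_not (g : String) (hm : pvSLOT2_RUNS.contains g = false)
    (hm2 : pvSLOT2_SINGLE.contains g = false) :
    (pvSLOT_OF.getD g []).filter (fun s => decide ((2 : Int) ≤ s)) =
      (pvSLOT_OF.getD g []).filter (fun s => decide ((3 : Int) ≤ s)) := by
  rcases pv_g_cases g with h|h|h|h|h|h|h|h|h|h|h|h|h|h|h|h|h|h|h|h|h|h|hrest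
  all_goals first | (subst h; revert hm hm2; decide) | simp_all

lemma pv_cands2_of (g : String) (hm : pvSLOT2_RUNS.contains g = true ∨ pvSLOT2_SINGLE.contains g = true) :
    (pvSLOT_OF.getD g []).filter (fun s => decide ((2 : Int) ≤ s)) = [2] := by
  rcases pv_g_cases g with h|h|h|h|h|h|h|h|h|h|h|h|h|h|h|h|h|h|h|h|h|h|hrest
  all_goals first | (subst h; revert hm; decide) | simp_all

lemma pv_cands1_of_not (g : String) (hm : pvSLOT1.contains g = false) :
    (pvSLOT_OF.getD g []).filter (fun s => decide ((1 : Int) ≤ s)) =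
      (pvSLOT_OF.getD g []).filter (fun s => decide ((2 : Int) ≤ s)) := by
  rcases pv_g_cases g with h|h|h|h|h|h|h|h|h|h|h|h|h|h|h|h|h|h|h|h|h|h|hrest
  all_goals first | (subst h; revert hm; decide) | simp_all

lemma pv_cands1_of (g : String) (hm : pvSLOT1.contains g = true) :
    ∃ t, (pvSLOT_OF.getD g []).filter (fun s => decide ((1 : Int) ≤ s)) = 1 :: t := by
  rcases pv_g_cases g with h|h|h|h|h|h|h|h|h|h|h|h|h|h|h|h|h|h|h|h|h|h|hrest
  all_goals first
    | (subst h; exact ⟨[], by decide⟩)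
    | (subst h; exact ⟨[5], by decide⟩)
    | (subst h; exact absurd hm (by decide))
    | simp_all

-- membership in a slot set pins down the run test
lemma pv_not_run5 (g : String) (hm : pvSLOT5.contains g = true) : ¬(g = "e" ∨ g = "i") := by
  rcases pv_g_cases g with h|h|h|h|h|h|h|h|h|h|h|h|h|h|h|h|h|h|h|h|h|h|hrest
  all_goals first | (subst h; revert hm; decide) | simp_all
lemma pv_not_run1 (g : String) (hm : pvSLOT1.contains g = true) : ¬(g = "e" ∨ g = "i") := by
  rcases pv_g_cases g with h|h|h|h|h|h|h|h|h|h|h|h|h|h|h|h|h|h|h|h|h|h|hrest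
  all_goals first | (subst h; revert hm; decide) | simp_all

-- cursor 6: no slot left, pvRun returns its accumulator immediately
lemma pv_cands6 (g : String) :
    (pvSLOT_OF.getD g []).filter (fun s => decide ((6 : Int) ≤ s)) = [] := by
  rcases pv_g_cases g with h|h|h|h|h|h|h|h|h|h|h|h|h|h|h|h|h|h|h|h|h|h|hrest
  all_goals first | (subst h; decide) | simp_all

lemma pvRun_six (gs : List String) (slots : List Int) : pvRun gs 6 slots = slots := by
  cases gs with
  | nil => simp [pvRun]
  | cons g rest => simp [pvRun, pv_cands6]


-- one-step evaluation of pvRun / pvAssign once the candidate list is known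
lemma pvRun_cons_none (g : String) (rest : List String) (nxt : Int) (slots : List Int)
    (h : (pvSLOT_OF.getD g []).filter (fun s => decide (nxt ≤ s)) = []) :
    pvRun (g :: rest) nxt slots = slots := by
  rw [pvRun, h]

lemma pvRun_cons_some (g : String) (rest : List String) (nxt : Int) (slots : List Int)
    (c : Int) (t : List Int)
    (h : (pvSLOT_OF.getD g []).filter (fun s => decide (nxt ≤ s)) = c :: t) :
    pvRun (g :: rest) nxt slots =
      pvRun (if g = "e" ∨ g = "i" then rest.dropWhile (fun x => decide (x = g)) else rest)
        (c + 1) (slots.set (c - 1).toNat 1) := by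
  rw [pvRun, h]

-- the first step of pvRun is unchanged when the cursor moves past a slot the glyph is not in
lemma pvRun_shift (g : String) (rest : List String) (slots : List Int) (nxt nxt' : Int)
    (h : (pvSLOT_OF.getD g []).filter (fun s => decide (nxt ≤ s)) =
         (pvSLOT_OF.getD g []).filter (fun s => decide (nxt' ≤ s))) :
    pvRun (g :: rest) nxt slots = pvRun (g :: rest) nxt' slots := by
  conv_lhs => rw [pvRun]
  conv_rhs => rw [pvRun]
  rw [h]

lemma pvAssign_cons_none (g : String) (rest : List String) (nxt : Int) (slots : List Int)
    (h : (pvSLOT_OF.getD g []).filter (fun s => decide (nxt ≤ s)) = []) :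
    pvAssign (g :: rest) nxt slots = slots := by
  rw [pvAssign, h]

lemma pvAssign_cons_some (g : String) (rest : List String) (nxt : Int) (slots : List Int)
    (c : Int) (t : List Int)
    (h : (pvSLOT_OF.getD g []).filter (fun s => decide (nxt ≤ s)) = c :: t) :
    pvAssign (g :: rest) nxt slots = pvAssign rest (c + 1) (slots.set (c - 1).toNat 1) := by
  rw [pvAssign, h]

-- A's while loop lands exactly where dropWhile lands
lemma pv_drop_skipRun (runs gs : List String) (pos : Nat) :
    gs.drop (pvSkipRun runs gs pos) = (gs.drop pos).dropWhile (fun x => runs.contains x) := by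
  induction pos using pvSkipRun.induct (runs := runs) (gs := gs) with
  | case1 pos hcond ih =>
    have hD : gs.getD pos "" = gs[pos] := List.getD_eq_getElem gs "" hcond.1
    have hc : gs[pos] ∈ runs := by have h2 := hcond.2; rw [hD] at h2; simpa using h2
    rw [pvSkipRun, if_pos hcond, ih, List.drop_eq_getElem_cons hcond.1, List.dropWhile_cons]
    simp [hc]
  | case2 pos hcond =>
    rw [pvSkipRun, if_neg hcond]
    by_cases hl : pos < gs.length
    · have hD : gs.getD pos "" = gs[pos] := List.getD_eq_getElem gs "" hl
      have hc : gs[pos] ∉ runs := by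
        intro hmem
        exact hcond ⟨hl, by rw [hD]; simpa using hmem⟩
      conv_rhs => rw [List.drop_eq_getElem_cons hl, List.dropWhile_cons]
      simp [hc, ← List.drop_eq_getElem_cons hl]
    · rw [List.drop_eq_nil_of_le (by omega)]
      simp

-- ----- A-side: each tail of A's block chain equals pvRun from the same position -----

lemma pv_T5 (gs : List String) (pos : Nat) (s1 s2 s3 s4 : Int) :
    [s1, s2, s3, s4,
      if pos < gs.length ∧ pvSLOT5.contains (gs.getD pos "") = true then (1 : Int) else 0] =
    pvRun (gs.drop pos) 5 [s1, s2, s3, s4, 0] := by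
  by_cases hl : pos < gs.length
  · have hg : gs.getD pos "" = gs[pos] := List.getD_eq_getElem gs "" hl
    rw [hg, List.drop_eq_getElem_cons hl]
    by_cases h5 : pvSLOT5.contains gs[pos] = true
    · rw [pvRun_cons_some _ _ _ _ 5 [] (by rw [pv_cands5, if_pos h5]),
        if_neg (pv_not_run5 _ h5), if_pos ⟨hl, h5⟩]
      simp [pvRun_six]
    · rw [pvRun_cons_none _ _ _ _ (by rw [pv_cands5, if_neg h5]),
        if_neg (fun hc => h5 hc.2)]
  · rw [List.drop_eq_nil_of_le (by omega)]
    simp [pvRun, hl]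

lemma pv_T4 (gs : List String) (pos : Nat) (s1 s2 s3 : Int) :
    (let (s4, pos4) :=
      if pos < gs.length then
        if pvSLOT4_RUNS.contains (gs.getD pos "") = true then
          ((1 : Int), pvSkipRun pvSLOT4_RUNS gs pos)
        else if pvSLOT4_SINGLE.contains (gs.getD pos "") = true then (1, pos + 1)
        else (0, pos)
      else (0, pos)
    let s5 :=
      if pos4 < gs.length ∧ pvSLOT5.contains (gs.getD pos4 "") = true then (1 : Int) else 0
    [s1, s2, s3, s4, s5]) =
    pvRun (gs.drop pos) 4 [s1, s2, s3, 0, 0] := by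
  by_cases hl : pos < gs.length
  · have hg : gs.getD pos "" = gs[pos] := List.getD_eq_getElem gs "" hl
    rw [hg, List.drop_eq_getElem_cons hl]
    by_cases hr : pvSLOT4_RUNS.contains gs[pos] = true
    · have hi : gs[pos] = "i" := by simpa [pvSLOT4_RUNS] using hr
      have hX : gs.drop (pvSkipRun pvSLOT4_RUNS gs pos) =
          (gs.drop (pos + 1)).dropWhile (fun x => decide (x = gs[pos])) := by
        rw [pv_drop_skipRun, List.drop_eq_getElem_cons hl, List.dropWhile_cons]
        have hpred : (fun x => pvSLOT4_RUNS.contains x) =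
            (fun x => decide (x = gs[pos])) := by
          funext x; simp [pvSLOT4_RUNS, hi]
        simp only [hr, if_true, hpred]
      rw [if_pos hl, if_pos hr,
        pvRun_cons_some _ _ _ _ 4 [] (by rw [pv_cands4, if_pos (Or.inl hr)]),
        if_pos (Or.inr hi), ← hX]
      have hset : ([s1, s2, s3, 0, 0].set ((4 : Int) - 1).toNat 1) = [s1, s2, s3, 1, 0] := by
        simp
      rw [hset, show (4 : Int) + 1 = 5 by norm_num]
      exact pv_T5 gs (pvSkipRun pvSLOT4_RUNS gs pos) s1 s2 s3 1
    · by_cases hs : pvSLOT4_SINGLE.contains gs[pos] = true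
      · have hd : gs[pos] = "d" := by simpa [pvSLOT4_SINGLE] using hs
        rw [if_pos hl, if_neg hr, if_pos hs,
          pvRun_cons_some _ _ _ _ 4 [] (by rw [pv_cands4, if_pos (Or.inr hs)]),
          if_neg (by simp [hd])]
        have hset : ([s1, s2, s3, 0, 0].set ((4 : Int) - 1).toNat 1) = [s1, s2, s3, 1, 0] := by
          simp
        rw [hset, show (4 : Int) + 1 = 5 by norm_num]
        exact pv_T5 gs (pos + 1) s1 s2 s3 1
      · rw [if_pos hl, if_neg hr, if_neg hs]
        by_cases h5 : pvSLOT5.contains gs[pos] = true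
        · rw [pvRun_cons_some _ _ _ _ 5 []
            (by rw [pv_cands4, if_neg (fun hc => hc.elim hr hs), if_pos h5]),
            if_neg (pv_not_run5 _ h5),
            show ([s1, s2, s3, 0, 0].set ((5 : Int) - 1).toNat 1) = [s1, s2, s3, 0, 1] by simp,
            show (5 : Int) + 1 = 6 by norm_num, pvRun_six]
          show [s1, s2, s3, 0,
            if pos < gs.length ∧ pvSLOT5.contains (gs.getD pos "") = true then (1 : Int) else 0] =
            [s1, s2, s3, 0, 1]
          rw [if_pos ⟨hl, by rw [hg]; exact h5⟩]
        · rw [pvRun_cons_none _ _ _ _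
            (by rw [pv_cands4, if_neg (fun hc => hc.elim hr hs), if_neg h5])]
          show [s1, s2, s3, 0,
            if pos < gs.length ∧ pvSLOT5.contains (gs.getD pos "") = true then (1 : Int) else 0] =
            [s1, s2, s3, 0, 0]
          rw [if_neg (fun hc => h5 (by rw [← hg]; exact hc.2))]
  · rw [if_neg hl, List.drop_eq_nil_of_le (by omega)]
    show [s1, s2, s3, 0,
      if pos < gs.length ∧ pvSLOT5.contains (gs.getD pos "") = true then (1 : Int) else 0] =
      pvRun [] 4 [s1, s2, s3, 0, 0]
    rw [if_neg (fun hc => hl hc.1)]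
    simp [pvRun]

lemma pv_T3 (gs : List String) (pos : Nat) (s1 s2 : Int) :
    (let (s3, pos3) :=
      if pos < gs.length ∧ pvSLOT3.contains (gs.getD pos "") = true then ((1 : Int), pos + 1)
      else (0, pos)
    let (s4, pos4) :=
      if pos3 < gs.length then
        if pvSLOT4_RUNS.contains (gs.getD pos3 "") = true then
          ((1 : Int), pvSkipRun pvSLOT4_RUNS gs pos3)
        else if pvSLOT4_SINGLE.contains (gs.getD pos3 "") = true then (1, pos3 + 1)
        else (0, pos3)
      else (0, pos3)
    let s5 :=
      if pos4 < gs.length ∧ pvSLOT5.contains (gs.getD pos4 "") = true then (1 : Int) else 0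
    [s1, s2, s3, s4, s5]) =
    pvRun (gs.drop pos) 3 [s1, s2, 0, 0, 0] := by
  by_cases hl : pos < gs.length
  · have hg : gs.getD pos "" = gs[pos] := List.getD_eq_getElem gs "" hl
    rw [hg, List.drop_eq_getElem_cons hl]
    by_cases h3 : pvSLOT3.contains gs[pos] = true
    · have ho : gs[pos] = "o" := by simpa [pvSLOT3] using h3
      rw [if_pos ⟨hl, h3⟩,
        pvRun_cons_some _ _ _ _ 3 [] (pv_cands3_of _ h3),
        if_neg (by simp [ho]),
        show ([s1, s2, 0, 0, 0].set ((3 : Int) - 1).toNat 1) = [s1, s2, 1, 0, 0] by simp,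
        show (3 : Int) + 1 = 4 by norm_num]
      exact pv_T4 gs (pos + 1) s1 s2 1
    · rw [if_neg (fun hc => h3 hc.2),
        pvRun_shift _ _ _ 3 4 (pv_cands3_of_not _ (Bool.eq_false_iff.mpr h3)),
        ← List.drop_eq_getElem_cons hl]
      exact pv_T4 gs pos s1 s2 0
  · rw [if_neg (fun hc => hl hc.1), List.drop_eq_nil_of_le (by omega)]
    have h4 := pv_T4 gs pos s1 s2 0
    rw [List.drop_eq_nil_of_le (by omega)] at h4
    exact h4.trans (by simp [pvRun])

lemma pv_T2 (gs : List String) (pos : Nat) (s1 : Int) :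
    (let (s2, pos2) :=
      if pos < gs.length then
        if pvSLOT2_RUNS.contains (gs.getD pos "") = true then
          ((1 : Int), pvSkipRun pvSLOT2_RUNS gs pos)
        else if pvSLOT2_SINGLE.contains (gs.getD pos "") = true then (1, pos + 1)
        else (0, pos)
      else (0, pos)
    let (s3, pos3) :=
      if pos2 < gs.length ∧ pvSLOT3.contains (gs.getD pos2 "") = true then ((1 : Int), pos2 + 1)
      else (0, pos2)
    let (s4, pos4) :=
      if pos3 < gs.length then
        if pvSLOT4_RUNS.contains (gs.getD pos3 "") = true then
          ((1 : Int), pvSkipRun pvSLOT4_RUNS gs pos3)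
        else if pvSLOT4_SINGLE.contains (gs.getD pos3 "") = true then (1, pos3 + 1)
        else (0, pos3)
      else (0, pos3)
    let s5 :=
      if pos4 < gs.length ∧ pvSLOT5.contains (gs.getD pos4 "") = true then (1 : Int) else 0
    [s1, s2, s3, s4, s5]) =
    pvRun (gs.drop pos) 2 [s1, 0, 0, 0, 0] := by
  by_cases hl : pos < gs.length
  · have hg : gs.getD pos "" = gs[pos] := List.getD_eq_getElem gs "" hl
    rw [hg, List.drop_eq_getElem_cons hl]
    by_cases hr : pvSLOT2_RUNS.contains gs[pos] = true
    · have he : gs[pos] = "e" := by simpa [pvSLOT2_RUNS] using hr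
      have hX : gs.drop (pvSkipRun pvSLOT2_RUNS gs pos) =
          (gs.drop (pos + 1)).dropWhile (fun x => decide (x = gs[pos])) := by
        rw [pv_drop_skipRun, List.drop_eq_getElem_cons hl, List.dropWhile_cons]
        have hpred : (fun x => pvSLOT2_RUNS.contains x) =
            (fun x => decide (x = gs[pos])) := by
          funext x; simp [pvSLOT2_RUNS, he]
        simp only [hr, if_true, hpred]
      rw [if_pos hl, if_pos hr,
        pvRun_cons_some _ _ _ _ 2 [] (pv_cands2_of _ (Or.inl hr)),
        if_pos (Or.inl he), ← hX,
        show ([s1, 0, 0, 0, 0].set ((2 : Int) - 1).toNat 1) = [s1, 1, 0, 0, 0] by simp,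
        show (2 : Int) + 1 = 3 by norm_num]
      exact pv_T3 gs (pvSkipRun pvSLOT2_RUNS gs pos) s1 1
    · by_cases hs : pvSLOT2_SINGLE.contains gs[pos] = true
      · have hqa : gs[pos] = "q" ∨ gs[pos] = "a" := by simpa [pvSLOT2_SINGLE] using hs
        rw [if_pos hl, if_neg hr, if_pos hs,
          pvRun_cons_some _ _ _ _ 2 [] (pv_cands2_of _ (Or.inr hs)),
          if_neg (by rcases hqa with h | h <;> simp [h]),
          show ([s1, 0, 0, 0, 0].set ((2 : Int) - 1).toNat 1) = [s1, 1, 0, 0, 0] by simp,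
          show (2 : Int) + 1 = 3 by norm_num]
        exact pv_T3 gs (pos + 1) s1 1
      · rw [if_pos hl, if_neg hr, if_neg hs,
          pvRun_shift _ _ _ 2 3
            (pv_cands2_of_not _ (Bool.eq_false_iff.mpr hr) (Bool.eq_false_iff.mpr hs)),
          ← List.drop_eq_getElem_cons hl]
        exact pv_T3 gs pos s1 0
  · rw [if_neg hl, List.drop_eq_nil_of_le (by omega)]
    have h3 := pv_T3 gs pos s1 0
    rw [List.drop_eq_nil_of_le (by omega)] at h3
    exact h3.trans (by simp [pvRun])

lemma pv_A_run (gs : List String) : slot_pattern gs = pvRun gs 1 [0, 0, 0, 0, 0] := by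
  unfold slot_pattern
  by_cases h1 : 0 < gs.length ∧ pvSLOT1.contains (gs.getD 0 "") = true
  · have hg : gs.getD 0 "" = gs[0]'h1.1 := List.getD_eq_getElem gs "" h1.1
    have hc : pvSLOT1.contains (gs[0]'h1.1) = true := hg ▸ h1.2
    obtain ⟨t, ht⟩ := pv_cands1_of _ hc
    rw [if_pos h1]
    conv_rhs => rw [show gs = gs[0]'h1.1 :: gs.drop 1 from by
      simpa using List.drop_eq_getElem_cons h1.1]
    rw [pvRun_cons_some _ _ _ _ 1 t ht, if_neg (pv_not_run1 _ hc),
      show ([(0 : Int), 0, 0, 0, 0].set ((1 : Int) - 1).toNat 1) = [1, 0, 0, 0, 0] by simp,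
      show (1 : Int) + 1 = 2 by norm_num]
    exact pv_T2 gs (0 + 1) 1
  · rw [if_neg h1]
    by_cases hl : 0 < gs.length
    · have hg : gs.getD 0 "" = gs[0]'hl := List.getD_eq_getElem gs "" hl
      have hc : pvSLOT1.contains (gs[0]'hl) = false := by
        rw [← hg]; exact Bool.eq_false_iff.mpr (fun he => h1 ⟨hl, he⟩)
      conv_rhs => rw [show gs = gs[0]'hl :: gs.drop 1 from by
        simpa using List.drop_eq_getElem_cons hl]
      rw [pvRun_shift _ _ _ 1 2 (pv_cands1_of_not _ hc),
        show (gs[0]'hl :: gs.drop 1) = gs.drop 0 from by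
          simpa using (List.drop_eq_getElem_cons hl).symm]
      exact pv_T2 gs 0 0
    · have hnil : gs = [] := by
        cases gs with
        | nil => rfl
        | cons a l => exact absurd (by simp : 0 < (a :: l).length) hl
      subst hnil
      simp [pvRun]

-- ----- B-side: collapse-then-assign equals pvRun -----

-- recursive characterisation of the collapse fold, carrying the last appended glyph
def pvCollapseAfter : Option String → List String → List String
  | _, [] => []
  | last, g :: rest =>
    if (g = "e" ∨ g = "i") ∧ last = some g then pvCollapseAfter last rest
    else g :: pvCollapseAfter (some g) rest

lemma pv_collapse_fold (gs : List String) : ∀ acc : List String,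
    gs.foldl
      (fun collapsed g =>
        if ¬((g = "e" ∨ g = "i") ∧ collapsed ≠ [] ∧ collapsed.getLast? = some g)
        then collapsed ++ [g] else collapsed) acc =
    acc ++ pvCollapseAfter acc.getLast? gs := by
  induction gs with
  | nil => intro acc; simp [pvCollapseAfter]
  | cons g rest ih =>
    intro acc
    rw [List.foldl_cons, ih]
    by_cases hcond : (g = "e" ∨ g = "i") ∧ acc ≠ [] ∧ acc.getLast? = some g
    · obtain ⟨hrun, hne, hlast⟩ := hcond
      rw [if_neg (not_not_intro ⟨hrun, hne, hlast⟩)]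
      conv_rhs => rw [pvCollapseAfter]
      rw [hlast, if_pos ⟨hrun, rfl⟩]
    · rw [if_pos hcond]
      have hlast : (acc ++ [g]).getLast? = some g := by simp
      rw [hlast]
      conv_rhs => rw [pvCollapseAfter]
      have hcond' : ¬((g = "e" ∨ g = "i") ∧ acc.getLast? = some g) := by
        intro ⟨hrun, hl⟩
        exact hcond ⟨hrun, by rintro rfl; simp at hl, hl⟩
      rw [if_neg hcond']
      simp

lemma pv_CA_not_run (g : String) (h : ¬(g = "e" ∨ g = "i")) (l : List String) :
    pvCollapseAfter (some g) l = pvCollapseAfter none l := by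
  cases l with
  | nil => rfl
  | cons x rest =>
    rw [pvCollapseAfter, pvCollapseAfter]
    have hc : ¬((x = "e" ∨ x = "i") ∧ (some g : Option String) = some x) := by
      intro ⟨hrun, hx⟩
      exact h (Option.some.inj hx ▸ hrun)
    rw [if_neg hc, if_neg (by simp)]

lemma pv_CA_run (g : String) (h : g = "e" ∨ g = "i") (l : List String) :
    pvCollapseAfter (some g) l =
      pvCollapseAfter none (l.dropWhile (fun x => decide (x = g))) := by
  induction l with
  | nil => rfl
  | cons x rest ih =>
    by_cases hx : x = g
    · subst hx
      rw [pvCollapseAfter, if_pos ⟨h, rfl⟩, List.dropWhile_cons,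
        if_pos (by simp : decide (x = x) = true)]
      exact ih
    · rw [pvCollapseAfter, if_neg (fun hc => hx (Option.some.inj hc.2).symm),
        List.dropWhile_cons, if_neg (by simp [hx]),
        pvCollapseAfter, if_neg (by simp)]

lemma pv_assign_run (gs : List String) (nxt : Int) (slots : List Int) :
    pvAssign (pvCollapseAfter none gs) nxt slots = pvRun gs nxt slots := by
  induction gs, nxt, slots using pvRun.induct with
  | case1 nxt slots => simp [pvCollapseAfter, pvAssign, pvRun]
  | case2 nxt slots g rest hcands =>
    rw [pvRun_cons_none _ _ _ _ hcands]
    rw [show pvCollapseAfter none (g :: rest) = g :: pvCollapseAfter (some g) rest from by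
      rw [pvCollapseAfter, if_neg (by simp)]]
    rw [pvAssign_cons_none _ _ _ _ hcands]
  | case3 nxt slots g rest c t hcands ih =>
    rw [pvRun_cons_some _ _ _ _ c t hcands]
    rw [show pvCollapseAfter none (g :: rest) = g :: pvCollapseAfter (some g) rest from by
      rw [pvCollapseAfter, if_neg (by simp)]]
    rw [pvAssign_cons_some _ _ _ _ c t hcands]
    by_cases hrun : g = "e" ∨ g = "i"
    · rw [pv_CA_run g hrun rest]
      rw [dif_pos hrun] at ih
      rw [if_pos hrun]
      exact ih
    · rw [pv_CA_not_run g hrun rest]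
      rw [dif_neg hrun] at ih
      rw [if_neg hrun]
      exact ih

-- ===== VERDICT (by name: the statement is the Claim_ definition above) =====
theorem slot_pattern_spec : Claim_equal_slot_pattern := by
  intro gs _
  unfold Spec_slot_pattern slot_pattern_alt pvCollapse
  rw [pv_collapse_fold gs []]
  simp only [List.nil_append, List.getLast?_nil]
  rw [pv_assign_run, pv_A_run]
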